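-- pv_equiv track=rewrite | github.com/dbsrl1026/boj-solve | 16954.py | dfs
-- ===== SOURCE A (Python) =====
-- dx = [-1, 0, 1, -1, 0, 1, -1, 0, 1]
--
-- dy = [1, 1, 1, 0, 0, 0, -1, -1, -1]
--
-- def dfs(board, nowX, nowY):
--     if nowX == 0 and nowY == 7:
--         return True
--     for i in range(9):
--         newX = nowX + dx[i]
--         newY = nowY + dy[i]
--         if 0 <= newX < 8 and 0 <= newY < 8 and board[newX][newY] != '#' and (newX == 0 or board[newX - 1][newY] != '#'):
--             if dfs([['.', '.', '.', '.', '.', '.', '.', '.']] + board[:7], newX, newY):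
--                 return True
--     return False
-- ===== SOURCE B (Python) =====
-- dx = [-1, 0, 1, -1, 0, 1, -1, 0, 1]
--
-- dy = [1, 1, 1, 0, 0, 0, -1, -1, -1]
--
-- def dfs(board, nowX, nowY):
--     # Level-synchronised BFS over positions, advancing the falling-wall board one
--     # shift per level; after 8 shifts the board is clear, so any survivor escapes.
--     if nowX == 0 and nowY == 7:
--         return True
--     frontier = {(nowX, nowY)}
--     cur = board
--     for _ in range(8):
--         nxt = set()
--         for (x, y) in frontier:
--             for i in range(9):
--                 nX, nY = x + dx[i], y + dy[i]
--                 if 0 <= nX < 8 and 0 <= nY < 8 and cur[nX][nY] != '#' and (nX == 0 or cur[nX - 1][nY] != '#'):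
--                     nxt.add((nX, nY))
--         if (0, 7) in nxt:
--             return True
--         cur = [['.'] * 8] + cur[:7]
--         if all(c != '#' for row in cur for c in row):
--             return len(nxt) > 0
--         frontier = nxt
--     return False
-- ===== Notes on version B (the rewrite author's own statement) =====
-- stated objective: alternative
-- what changed: Replaces A's exponential backtracking DFS (re-exploring positions along every path of the shifting board) by a level-synchronised BFS that keeps one set of reachable positions per time step, shifts the board once per level, and stops after at most 8 levels when the board has become all-clear.
-- outside the precondition, e.g. on dfs([['#', '2_3'], ['#', '2_3'], ['#', '2_3']], 0, 0): A returns True, B raises IndexError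
import Mathlib
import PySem

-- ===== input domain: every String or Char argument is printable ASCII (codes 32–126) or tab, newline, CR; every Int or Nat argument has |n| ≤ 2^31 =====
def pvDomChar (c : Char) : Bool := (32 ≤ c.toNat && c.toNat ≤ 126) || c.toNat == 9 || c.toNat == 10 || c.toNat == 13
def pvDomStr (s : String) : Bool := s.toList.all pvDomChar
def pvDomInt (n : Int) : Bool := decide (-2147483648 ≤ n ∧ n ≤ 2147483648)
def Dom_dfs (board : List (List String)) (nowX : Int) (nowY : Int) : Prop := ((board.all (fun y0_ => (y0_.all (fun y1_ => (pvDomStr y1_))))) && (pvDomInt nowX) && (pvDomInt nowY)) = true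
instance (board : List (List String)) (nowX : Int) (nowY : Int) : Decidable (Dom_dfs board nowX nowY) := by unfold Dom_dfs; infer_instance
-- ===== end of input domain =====

-- B replaces A's exponential backtracking DFS over the shifting board by a level-synchronised
-- BFS over position sets (one board shift per level; after 8 shifts the board is clear, so
-- any surviving position escapes): an alternative algorithm of bounded work.

-- module constants dx, dy (shared by both Python versions)
def dxL : List Int := [-1, 0, 1, -1, 0, 1, -1, 0, 1]
def dyL : List Int := [1, 1, 1, 0, 0, 0, -1, -1, -1]

-- board[i][j] as both Pythons read it; exact wherever Python does not raise
-- IndexError (Pre_dfs excludes the raising inputs; the defaults are never used there)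
def cellA (b : List (List String)) (i j : Int) : String :=
  (PySem.List.pyGet? ((PySem.List.pyGet? b i).getD []) j).getD "#"

-- ===== PORT A =====
-- A's recursion, made total with constant fuel (on every input A returns on, its depth is
-- below 32 — the board is all-clear after 8 shifts); the fuel only makes the recursion total.
def dfsF : Nat → List (List String) → Int → Int → Bool
  | 0, _, _, _ => false
  | n+1, board, nowX, nowY =>
    if nowX = 0 ∧ nowY = 7 then true
    else
      (List.range 9).any (fun i =>
        let newX := nowX + dxL.getD i 0      -- dx[i], i < 9: in range
        let newY := nowY + dyL.getD i 0
        decide (0 ≤ newX ∧ newX < 8 ∧ 0 ≤ newY ∧ newY < 8) &&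
          (cellA board newX newY != "#") &&
          (newX == 0 || cellA board (newX - 1) newY != "#") &&
          dfsF n ([[".", ".", ".", ".", ".", ".", ".", "."]] ++ board.take 7) newX newY)
          -- board.take 7 = board[:7] (nonnegative bound)

def dfs (board : List (List String)) (nowX : Int) (nowY : Int) : Bool :=
  dfsF 32 board nowX nowY

-- ===== PORT B =====
def okB (cur : List (List String)) (nX nY : Int) : Bool :=
  decide (0 ≤ nX ∧ nX < 8 ∧ 0 ≤ nY ∧ nY < 8) &&
    (cellA cur nX nY != "#") && (nX == 0 || cellA cur (nX - 1) nY != "#")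

-- nxt = {moves (nX,nY) ok from some p in frontier}  (the two nested for-loops with nxt.add)
def expandB (cur : List (List String)) (frontier : PySem.Set (Int × Int)) :
    PySem.Set (Int × Int) :=
  frontier.foldl (fun nxt p =>
    (List.range 9).foldl (fun nxt i =>
      let nX := p.1 + dxL.getD i 0
      let nY := p.2 + dyL.getD i 0
      if okB cur nX nY then PySem.Set.add nxt (nX, nY) else nxt) nxt)
    PySem.Set.empty

-- all(c != '#' for row in cur for c in row)
def isClearB (b : List (List String)) : Bool := b.all (fun row => row.all (fun c => c != "#"))

-- the 'for _ in range(8)' loop of Source B (k = iterations left; falls through to False)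
def loopB : Nat → List (List String) → PySem.Set (Int × Int) → Bool
  | 0, _, _ => false
  | k+1, cur, frontier =>
    let nxt := expandB cur frontier
    if PySem.Set.contains nxt ((0 : Int), (7 : Int)) then true
    else
      let cur' := [List.replicate 8 "."] ++ cur.take 7   -- [['.']*8] + cur[:7]
      if isClearB cur' then decide (0 < PySem.Set.len nxt)
      else loopB k cur' nxt

def dfs_alt (board : List (List String)) (nowX : Int) (nowY : Int) : Bool :=
  if nowX = 0 ∧ nowY = 7 then true
  else loopB 8 board (PySem.Set.ofList [(nowX, nowY)])

-- ===== PRECONDITION & SPEC =====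
-- Pre_ excludes only boards on which A can raise IndexError (fewer than 8 rows, or a short
-- row among the first 8) — except when the start square is the goal or too far from the
-- 8×8 box to ever index the board, where A returns without reading it.
def Pre_dfs (board : List (List String)) (nowX : Int) (nowY : Int) : Prop :=
  (8 ≤ board.length ∧ ∀ r ∈ board.take 8, 8 ≤ r.length) ∨
    (nowX = 0 ∧ nowY = 7) ∨ nowX < -1 ∨ 8 < nowX ∨ nowY < -1 ∨ 8 < nowY
instance (board : List (List String)) (nowX : Int) (nowY : Int) : Decidable (Pre_dfs board nowX nowY) := by unfold Pre_dfs; infer_instance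

def pvWitness_dfs : List (List String) × Int × Int :=
  ([["#", "#", ".", ".", ".", ".", ".", "."],
    [".", ".", ".", "#", ".", ".", ".", "."],
    [".", ".", ".", ".", ".", ".", "#", "."],
    [".", ".", ".", ".", ".", ".", ".", "."],
    [".", "#", ".", ".", ".", ".", ".", "."],
    [".", ".", ".", ".", "#", ".", ".", "."],
    [".", ".", ".", ".", ".", ".", ".", "."],
    [".", ".", ".", ".", ".", ".", ".", "."]], 7, 0)

def Spec_dfs (board : List (List String)) (nowX : Int) (nowY : Int) (out : Bool) : Prop := out = dfs_alt board nowX nowY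
instance (board : List (List String)) (nowX : Int) (nowY : Int) (out : Bool) : Decidable (Spec_dfs board nowX nowY out) := by unfold Spec_dfs; infer_instance

-- ===== CLAIM (what is proved, stated in full; the proofs are below) =====
def Claim_equal_dfs : Prop := ∀ (board : List (List String)) (nowX : Int) (nowY : Int), Dom_dfs board nowX nowY → Pre_dfs board nowX nowY → Spec_dfs board nowX nowY (dfs board nowX nowY)

-- ===== LEMMAS AND PROOFS =====

-- the board shift both programs perform
def sh (b : List (List String)) : List (List String) := List.replicate 8 "." :: b.take 7

-- k shifts, innermost first
def shIter : Nat → List (List String) → List (List String)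
  | 0, b => b
  | k+1, b => shIter k (sh b)

def WfB (b : List (List String)) : Prop := 8 ≤ b.length ∧ ∀ r ∈ b.take 8, 8 ≤ r.length
def ClearP (b : List (List String)) : Prop := ∀ r ∈ b, ∀ c ∈ r, c ≠ "#"

def OkP (b : List (List String)) (x y : Int) : Prop :=
  0 ≤ x ∧ x < 8 ∧ 0 ≤ y ∧ y < 8 ∧ cellA b x y ≠ "#" ∧ (x = 0 ∨ cellA b (x - 1) y ≠ "#")

-- escape in at most n moves
def EscN : Nat → List (List String) → Int → Int → Prop
  | 0, _, x, y => x = 0 ∧ y = 7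
  | n+1, b, x, y => (x = 0 ∧ y = 7) ∨
      ∃ i < 9, OkP b (x + dxL.getD i 0) (y + dyL.getD i 0) ∧
        EscN n (sh b) (x + dxL.getD i 0) (y + dyL.getD i 0)

def EscE (b : List (List String)) (x y : Int) : Prop := ∃ n, EscN n b x y


theorem goal_EscN (n : Nat) (b : List (List String)) (x y : Int) (hg : x = 0 ∧ y = 7) :
    EscN n b x y := by
  cases n with
  | zero => exact hg
  | succ n => exact Or.inl hg

theorem okB_iff (b : List (List String)) (x y : Int) : okB b x y = true ↔ OkP b x y := by
  simp only [okB, OkP, Bool.and_eq_true, decide_eq_true_eq, bne_iff_ne, Bool.or_eq_true,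
    beq_iff_eq]
  tauto

theorem shIter_succ_eq (k : Nat) : ∀ (b : List (List String)), k ≤ 7 →
    shIter (k+1) b = List.replicate (k+1) (List.replicate 8 ".") ++ b.take (7-k) := by
  induction k with
  | zero => intro b _; simp [shIter, sh]
  | succ k ih =>
    intro b hk
    have : shIter (k+1+1) b = shIter (k+1) (sh b) := rfl
    rw [this, ih (sh b) (by omega)]
    have h7 : 7 - k = (6 - k) + 1 := by omega
    have h7' : 7 - (k+1) = 6 - k := by omega
    simp only [sh, h7, h7', List.take_succ_cons, List.take_take]
    have hmin : min (6 - k) 7 = 6 - k := by omega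
    rw [hmin, show List.replicate (k+1+1) (List.replicate 8 ".") =
      List.replicate (k+1) (List.replicate 8 ".") ++ [List.replicate 8 "."] from
      List.replicate_succ' .. ]
    simp

theorem clear_shIter8 (b : List (List String)) : ClearP (shIter 8 b) := by
  have := shIter_succ_eq 7 b (by omega)
  rw [show (7+1 : Nat) = 8 from rfl] at this
  rw [this]
  intro r hr c hc
  have hr' : r = List.replicate 8 "." := by simpa using hr
  subst hr'
  have hc' : c = "." := by simpa using hc
  subst hc'
  decide

theorem wf_sh (b : List (List String)) (h : WfB b) : WfB (sh b) := by
  obtain ⟨hl, hr⟩ := h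
  constructor
  · simp [sh]; omega
  · intro r hrm
    have h2 : (sh b).take 8 = List.replicate 8 "." :: b.take 7 := by
      simp [sh, List.take_succ_cons, List.take_take]
    rw [h2] at hrm
    rcases List.mem_cons.mp hrm with h1 | h1
    · subst h1; simp
    · apply hr
      have h3 : (b.take 8).take 7 = b.take 7 := by simp [List.take_take]
      rw [← h3] at h1
      exact List.take_subset _ _ h1

theorem clear_sh (b : List (List String)) (h : ClearP b) : ClearP (sh b) := by
  intro r hrm c hc
  rcases List.mem_cons.mp hrm with h1 | h1
  · subst h1
    simp at hc; subst hc; decide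
  · exact h r (List.take_subset _ _ h1) c hc

theorem isClearB_iff (b : List (List String)) : isClearB b = true ↔ ClearP b := by
  simp [isClearB, ClearP, List.all_eq_true]

theorem cell_ne_of_clear (b : List (List String)) (hw : WfB b) (hc : ClearP b)
    (i j : Int) (h0 : 0 ≤ i) (h8 : i < 8) (j0 : 0 ≤ j) (j8 : j < 8) : cellA b i j ≠ "#" := by
  obtain ⟨hl, hr⟩ := hw
  have hi : i.toNat < b.length := by omega
  have hi8 : i.toNat < 8 := by omega
  have hrow : PySem.List.pyGet? b i = some b[i.toNat] := by
    rw [PySem.List.pyGet?_of_nonneg b h0]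
    exact List.getElem?_eq_getElem hi
  have hrlen : 8 ≤ b[i.toNat].length := by
    apply hr
    have : (b.take 8)[i.toNat]'(by simp; omega) = b[i.toNat] := List.getElem_take
    exact this ▸ List.getElem_mem _
  have hj : j.toNat < b[i.toNat].length := by omega
  have hcell : PySem.List.pyGet? b[i.toNat] j = some b[i.toNat][j.toNat] := by
    rw [PySem.List.pyGet?_of_nonneg b[i.toNat] j0]
    exact List.getElem?_eq_getElem hj
  simp only [cellA, hrow, Option.getD_some, hcell]
  exact hc _ (List.getElem_mem _) _ (List.getElem_mem _)

theorem EscN_mono (n : Nat) (b : List (List String)) (x y : Int) (h : EscN n b x y) :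
    EscN (n+1) b x y := by
  induction n generalizing b x y with
  | zero => exact Or.inl h
  | succ n ih =>
    rcases h with hg | ⟨i, hi, hok, he⟩
    · exact Or.inl hg
    · exact Or.inr ⟨i, hi, hok, ih _ _ _ he⟩

theorem EscN_le {n m : Nat} (h : n ≤ m) (b : List (List String)) (x y : Int)
    (he : EscN n b x y) : EscN m b x y := by
  induction m with
  | zero => rwa [Nat.le_zero.mp h] at he
  | succ m ih =>
    rcases Nat.lt_or_ge n (m+1) with h1 | h1
    · exact EscN_mono m b x y (ih (by omega))
    · rwa [Nat.le_antisymm h h1] at he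

theorem clear_escape (n : Nat) : ∀ (b : List (List String)) (x y : Int), WfB b → ClearP b →
    0 ≤ x → x < 8 → 0 ≤ y → y < 8 → (x + (7 - y)).toNat ≤ n → EscN n b x y := by
  induction n with
  | zero =>
    intro b x y _ _ hx0 hx8 hy0 hy8 hm
    exact goal_EscN 0 b x y (by omega)
  | succ n ih =>
    intro b x y hw hc hx0 hx8 hy0 hy8 hm
    by_cases hg : x = 0 ∧ y = 7
    · exact Or.inl hg
    have e0x : dxL.getD 0 0 = -1 := rfl
    have e0y : dyL.getD 0 0 = 1 := rfl
    have e1x : dxL.getD 1 0 = 0 := rfl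
    have e1y : dyL.getD 1 0 = 1 := rfl
    have e3x : dxL.getD 3 0 = -1 := rfl
    have e3y : dyL.getD 3 0 = 0 := rfl
    by_cases hy : y < 7
    · by_cases hx : 0 < x
      · -- move (-1, +1)
        refine Or.inr ⟨0, by omega, ?_, ?_⟩
        · rw [e0x, e0y]
          refine ⟨by omega, by omega, by omega, by omega,
            cell_ne_of_clear b hw hc _ _ (by omega) (by omega) (by omega) (by omega), ?_⟩
          by_cases h2 : x + (-1) = 0
          · exact Or.inl h2
          · exact Or.inr (cell_ne_of_clear b hw hc _ _ (by omega) (by omega) (by omega)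
              (by omega))
        · rw [e0x, e0y]
          exact ih (sh b) _ _ (wf_sh b hw) (clear_sh b hc) (by omega) (by omega) (by omega)
            (by omega) (by omega)
      · -- x = 0 : move (0, +1)
        refine Or.inr ⟨1, by omega, ?_, ?_⟩
        · rw [e1x, e1y]
          refine ⟨by omega, by omega, by omega, by omega,
            cell_ne_of_clear b hw hc _ _ (by omega) (by omega) (by omega) (by omega), ?_⟩
          exact Or.inl (by omega)
        · rw [e1x, e1y]
          exact ih (sh b) _ _ (wf_sh b hw) (clear_sh b hc) (by omega) (by omega) (by omega)
            (by omega) (by omega)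
    · -- y = 7, x > 0 : move (-1, 0)
      have hx : 0 < x := by omega
      refine Or.inr ⟨3, by omega, ?_, ?_⟩
      · rw [e3x, e3y]
        refine ⟨by omega, by omega, by omega, by omega,
          cell_ne_of_clear b hw hc _ _ (by omega) (by omega) (by omega) (by omega), ?_⟩
        by_cases h2 : x + (-1) = 0
        · exact Or.inl h2
        · exact Or.inr (cell_ne_of_clear b hw hc _ _ (by omega) (by omega) (by omega)
            (by omega))
      · rw [e3x, e3y]
        exact ih (sh b) _ _ (wf_sh b hw) (clear_sh b hc) (by omega) (by omega) (by omega)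
          (by omega) (by omega)

theorem dGetD_mem (i : Nat) (hi : i < 9) :
    -1 ≤ dxL.getD i 0 ∧ dxL.getD i 0 ≤ 1 ∧ -1 ≤ dyL.getD i 0 ∧ dyL.getD i 0 ≤ 1 := by
  interval_cases i <;> decide

theorem EscN_cut (m : Nat) : ∀ (b : List (List String)) (x y : Int) (n : Nat), WfB b →
    ClearP (shIter m b) → EscN n b x y → EscN (m + 15) b x y := by
  induction m with
  | zero =>
    intro b x y n hw hc he
    cases n with
    | zero => exact goal_EscN _ b x y he
    | succ n =>
      rcases he with hg | ⟨i, hi, hok, he⟩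
      · exact goal_EscN _ b x y hg
      · show EscN (14+1) b x y
        refine Or.inr ⟨i, hi, hok, ?_⟩
        obtain ⟨ha, hb', hc', hd, _, _⟩ := hok
        exact clear_escape 14 (sh b) _ _ (wf_sh b hw) (clear_sh b hc) ha hb' hc' hd (by omega)
  | succ m ih =>
    intro b x y n hw hc he
    cases n with
    | zero => exact goal_EscN _ b x y he
    | succ n =>
      rcases he with hg | ⟨i, hi, hok, he⟩
      · exact goal_EscN _ b x y hg
      · show EscN ((m + 15) + 1) b x y
        refine Or.inr ⟨i, hi, hok, ?_⟩
        exact ih (sh b) _ _ n (wf_sh b hw) hc he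

theorem EscE_iff_23 (b : List (List String)) (x y : Int) (hw : WfB b) :
    EscE b x y ↔ EscN 23 b x y := by
  constructor
  · rintro ⟨n, h⟩
    exact EscN_cut 8 b x y n hw (clear_shIter8 b) h
  · intro h; exact ⟨23, h⟩

theorem EscE_unfold (b : List (List String)) (x y : Int) :
    EscE b x y ↔ (x = 0 ∧ y = 7) ∨
      ∃ i < 9, OkP b (x + dxL.getD i 0) (y + dyL.getD i 0) ∧
        EscE (sh b) (x + dxL.getD i 0) (y + dyL.getD i 0) := by
  constructor
  · rintro ⟨n, h⟩
    cases n with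
    | zero => exact Or.inl h
    | succ n =>
      rcases h with hg | ⟨i, hi, hok, he⟩
      · exact Or.inl hg
      · exact Or.inr ⟨i, hi, hok, n, he⟩
  · rintro (hg | ⟨i, hi, hok, n, he⟩)
    · exact ⟨0, hg⟩
    · exact ⟨n + 1, Or.inr ⟨i, hi, hok, he⟩⟩

theorem dfsF_succ_iff (n : Nat) : ∀ (b : List (List String)) (x y : Int),
    (dfsF (n+1) b x y = true ↔ EscN n b x y) := by
  induction n with
  | zero =>
    intro b x y
    by_cases hg : x = 0 ∧ y = 7
    · rw [show dfsF 1 b x y = true from by simp [dfsF, hg]]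
      exact ⟨fun _ => hg, fun _ => rfl⟩
    · simp only [dfsF, if_neg hg]
      constructor
      · intro h
        exfalso
        rcases List.any_eq_true.mp h with ⟨i, _, hb⟩
        have hb' : (okB b (x + dxL.getD i 0) (y + dyL.getD i 0) &&
            dfsF 0 (sh b) (x + dxL.getD i 0) (y + dyL.getD i 0)) = true := hb
        rw [show dfsF 0 (sh b) (x + dxL.getD i 0) (y + dyL.getD i 0) = false from rfl] at hb'
        simp at hb'
      · intro h; exact absurd h hg
  | succ n ih =>
    intro b x y
    by_cases hg : x = 0 ∧ y = 7
    · rw [show dfsF (n+1+1) b x y = true from by simp [dfsF, hg]]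
      exact ⟨fun _ => Or.inl hg, fun _ => rfl⟩
    · simp only [dfsF, if_neg hg]
      rw [List.any_eq_true]
      constructor
      · rintro ⟨i, hi, hb⟩
        have hb' : (okB b (x + dxL.getD i 0) (y + dyL.getD i 0) &&
            dfsF (n+1) (sh b) (x + dxL.getD i 0) (y + dyL.getD i 0)) = true := hb
        rw [Bool.and_eq_true] at hb'
        exact Or.inr ⟨i, List.mem_range.mp hi, (okB_iff _ _ _).mp hb'.1,
          (ih _ _ _).mp hb'.2⟩
      · rintro (h | ⟨i, hi, hok, he⟩)
        · exact absurd h hg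
        · refine ⟨i, List.mem_range.mpr hi, ?_⟩
          show (okB b (x + dxL.getD i 0) (y + dyL.getD i 0) &&
            dfsF (n+1) (sh b) (x + dxL.getD i 0) (y + dyL.getD i 0)) = true
          rw [Bool.and_eq_true]
          exact ⟨(okB_iff _ _ _).mpr hok, (ih _ _ _).mpr he⟩

theorem dfs_iff (b : List (List String)) (x y : Int) (hw : WfB b) :
    (dfs b x y = true ↔ EscE b x y) := by
  have h31 : dfs b x y = dfsF (31+1) b x y := rfl
  rw [h31, dfsF_succ_iff 31 b x y]
  constructor
  · intro h; exact ⟨31, h⟩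
  · intro h
    exact EscN_le (by omega) b x y ((EscE_iff_23 b x y hw).mp h)

theorem mem_inner_fold (cur : List (List String)) (p : Int × Int) (L : List Nat) :
    ∀ (acc : PySem.Set (Int × Int)) (q : Int × Int),
    q ∈ L.foldl (fun nxt i =>
      if okB cur (p.1 + dxL.getD i 0) (p.2 + dyL.getD i 0) then
        PySem.Set.add nxt (p.1 + dxL.getD i 0, p.2 + dyL.getD i 0) else nxt) acc ↔
      q ∈ acc ∨ ∃ i ∈ L, okB cur (p.1 + dxL.getD i 0) (p.2 + dyL.getD i 0) = true ∧
        q = (p.1 + dxL.getD i 0, p.2 + dyL.getD i 0) := by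
  induction L with
  | nil => simp
  | cons j L ih =>
    intro acc q
    rw [List.foldl_cons, ih]
    by_cases hj : okB cur (p.1 + dxL.getD j 0) (p.2 + dyL.getD j 0) = true
    · rw [if_pos hj]
      rw [PySem.Set.mem_add acc _ q]
      constructor
      · rintro ((h | h) | h)
        · exact Or.inl h
        · exact Or.inr ⟨j, by simp, hj, h⟩
        · rcases h with ⟨i, hi, h1, h2⟩; exact Or.inr ⟨i, by simp [hi], h1, h2⟩
      · rintro (h | ⟨i, hi, h1, h2⟩)
        · exact Or.inl (Or.inl h)
        · rcases List.mem_cons.mp hi with rfl | hi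
          · exact Or.inl (Or.inr h2)
          · exact Or.inr ⟨i, hi, h1, h2⟩
    · rw [if_neg hj]
      constructor
      · rintro (h | ⟨i, hi, h1, h2⟩)
        · exact Or.inl h
        · exact Or.inr ⟨i, by simp [hi], h1, h2⟩
      · rintro (h | ⟨i, hi, h1, h2⟩)
        · exact Or.inl h
        · rcases List.mem_cons.mp hi with rfl | hi
          · exact absurd h1 hj
          · exact Or.inr ⟨i, hi, h1, h2⟩

theorem mem_outer_fold (cur : List (List String)) (F : List (Int × Int)) :
    ∀ (acc : PySem.Set (Int × Int)) (q : Int × Int),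
    q ∈ F.foldl (fun nxt p =>
      (List.range 9).foldl (fun nxt i =>
        if okB cur (p.1 + dxL.getD i 0) (p.2 + dyL.getD i 0) then
          PySem.Set.add nxt (p.1 + dxL.getD i 0, p.2 + dyL.getD i 0) else nxt) nxt) acc ↔
      q ∈ acc ∨ ∃ p ∈ F, ∃ i < 9,
        okB cur (p.1 + dxL.getD i 0) (p.2 + dyL.getD i 0) = true ∧
        q = (p.1 + dxL.getD i 0, p.2 + dyL.getD i 0) := by
  induction F with
  | nil => simp
  | cons p F ih =>
    intro acc q
    rw [List.foldl_cons, ih, mem_inner_fold]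
    constructor
    · rintro ((h | ⟨i, hi, h1, h2⟩) | ⟨p', hp', h⟩)
      · exact Or.inl h
      · exact Or.inr ⟨p, by simp, i, List.mem_range.mp hi, h1, h2⟩
      · exact Or.inr ⟨p', by simp [hp'], h⟩
    · rintro (h | ⟨p', hp', i, hi, h1, h2⟩)
      · exact Or.inl (Or.inl h)
      · rcases List.mem_cons.mp hp' with rfl | hp'
        · exact Or.inl (Or.inr ⟨i, List.mem_range.mpr hi, h1, h2⟩)
        · exact Or.inr ⟨p', hp', i, hi, h1, h2⟩

theorem mem_expand (cur : List (List String)) (F : PySem.Set (Int × Int)) (q : Int × Int) :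
    q ∈ expandB cur F ↔ ∃ p ∈ F, ∃ i < 9,
      OkP cur (p.1 + dxL.getD i 0) (p.2 + dyL.getD i 0) ∧
      q = (p.1 + dxL.getD i 0, p.2 + dyL.getD i 0) := by
  have h := mem_outer_fold cur F PySem.Set.empty q
  have he : expandB cur F = F.foldl (fun nxt p =>
      (List.range 9).foldl (fun nxt i =>
        if okB cur (p.1 + dxL.getD i 0) (p.2 + dyL.getD i 0) then
          PySem.Set.add nxt (p.1 + dxL.getD i 0, p.2 + dyL.getD i 0) else nxt) nxt)
      PySem.Set.empty := rfl
  rw [he, h]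
  have : ¬ q ∈ (PySem.Set.empty : PySem.Set (Int × Int)) := by simp [PySem.Set.empty]
  simp only [this, false_or]
  constructor
  · rintro ⟨p, hp, i, hi, h1, h2⟩; exact ⟨p, hp, i, hi, (okB_iff _ _ _).mp h1, h2⟩
  · rintro ⟨p, hp, i, hi, h1, h2⟩; exact ⟨p, hp, i, hi, (okB_iff _ _ _).mpr h1, h2⟩

theorem loopB_succ (k : Nat) (cur : List (List String)) (F : PySem.Set (Int × Int)) :
    loopB (k+1) cur F =
      if PySem.Set.contains (expandB cur F) ((0:Int), (7:Int)) then true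
      else if isClearB (sh cur) then decide (0 < PySem.Set.len (expandB cur F))
      else loopB k (sh cur) (expandB cur F) := rfl

theorem set_nonempty_iff (s : PySem.Set (Int × Int)) :
    decide (0 < PySem.Set.len s) = true ↔ ∃ q, q ∈ s := by
  cases s with
  | nil => simp [PySem.Set.len]
  | cons a t => simp [PySem.Set.len]

theorem loopB_spec (k : Nat) : ∀ (cur : List (List String)) (F : PySem.Set (Int × Int)),
    WfB cur → ClearP (shIter (k+1) cur) →
    (loopB (k+1) cur F = true ↔ ∃ p ∈ F, ∃ i < 9,
      OkP cur (p.1 + dxL.getD i 0) (p.2 + dyL.getD i 0) ∧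
      EscE (sh cur) (p.1 + dxL.getD i 0) (p.2 + dyL.getD i 0)) := by
  induction k with
  | zero =>
    intro cur F hw hc
    have hc1 : ClearP (sh cur) := hc
    rw [loopB_succ]
    by_cases h7 : PySem.Set.contains (expandB cur F) ((0:Int), (7:Int)) = true
    · rw [if_pos h7]
      simp only [true_iff]
      have hm : ((0:Int), (7:Int)) ∈ expandB cur F := by
        rw [← PySem.Set.contains_iff]; exact h7
      rcases (mem_expand cur F _).mp hm with ⟨p, hp, i, hi, hok, heq⟩
      have hx1 : p.1 + dxL.getD i 0 = 0 := (Prod.ext_iff.mp heq.symm).1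
      have hy1 : p.2 + dyL.getD i 0 = 7 := (Prod.ext_iff.mp heq.symm).2
      exact ⟨p, hp, i, hi, hok, ⟨0, hx1, hy1⟩⟩
    · rw [if_neg h7, if_pos ((isClearB_iff _).mpr hc1)]
      rw [set_nonempty_iff]
      constructor
      · rintro ⟨q, hq⟩
        rcases (mem_expand cur F q).mp hq with ⟨p, hp, i, hi, hok, heq⟩
        obtain ⟨ha, hb', hc', hd, _, _⟩ := hok
        refine ⟨p, hp, i, hi, ⟨ha, hb', hc', hd, by tauto, by tauto⟩, ?_⟩
        exact ⟨14, clear_escape 14 (sh cur) _ _ (wf_sh cur hw) hc1 ha hb' hc' hd (by omega)⟩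
      · rintro ⟨p, hp, i, hi, hok, _⟩
        exact ⟨_, (mem_expand cur F _).mpr ⟨p, hp, i, hi, hok, rfl⟩⟩
  | succ k ih =>
    intro cur F hw hc
    rw [loopB_succ]
    by_cases h7 : PySem.Set.contains (expandB cur F) ((0:Int), (7:Int)) = true
    · rw [if_pos h7]
      simp only [true_iff]
      have hm : ((0:Int), (7:Int)) ∈ expandB cur F := by
        rw [← PySem.Set.contains_iff]; exact h7
      rcases (mem_expand cur F _).mp hm with ⟨p, hp, i, hi, hok, heq⟩
      have hx1 : p.1 + dxL.getD i 0 = 0 := (Prod.ext_iff.mp heq.symm).1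
      have hy1 : p.2 + dyL.getD i 0 = 7 := (Prod.ext_iff.mp heq.symm).2
      exact ⟨p, hp, i, hi, hok, ⟨0, hx1, hy1⟩⟩
    · rw [if_neg h7]
      by_cases hcl : isClearB (sh cur) = true
      · rw [if_pos hcl]
        have hc1 : ClearP (sh cur) := (isClearB_iff _).mp hcl
        rw [set_nonempty_iff]
        constructor
        · rintro ⟨q, hq⟩
          rcases (mem_expand cur F q).mp hq with ⟨p, hp, i, hi, hok, heq⟩
          obtain ⟨ha, hb', hc', hd, he5, he6⟩ := hok
          refine ⟨p, hp, i, hi, ⟨ha, hb', hc', hd, he5, he6⟩, ?_⟩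
          exact ⟨14, clear_escape 14 (sh cur) _ _ (wf_sh cur hw) hc1 ha hb' hc' hd (by omega)⟩
        · rintro ⟨p, hp, i, hi, hok, _⟩
          exact ⟨_, (mem_expand cur F _).mpr ⟨p, hp, i, hi, hok, rfl⟩⟩
      · rw [if_neg hcl]
        have hc' : ClearP (shIter (k+1) (sh cur)) := hc
        rw [ih (sh cur) (expandB cur F) (wf_sh cur hw) hc']
        constructor
        · rintro ⟨q, hq, j, hj, hok', he'⟩
          rcases (mem_expand cur F q).mp hq with ⟨p, hp, i, hi, hok, heq⟩
          refine ⟨p, hp, i, hi, hok, ?_⟩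
          have hE : EscE (sh cur) q.1 q.2 :=
            (EscE_unfold (sh cur) q.1 q.2).mpr (Or.inr ⟨j, hj, hok', he'⟩)
          rwa [(Prod.ext_iff.mp heq).1, (Prod.ext_iff.mp heq).2] at hE
        · rintro ⟨p, hp, i, hi, hok, he⟩
          set q : Int × Int := (p.1 + dxL.getD i 0, p.2 + dyL.getD i 0) with hqdef
          have hq : q ∈ expandB cur F := (mem_expand cur F q).mpr ⟨p, hp, i, hi, hok, rfl⟩
          have hng : ¬ (q.1 = 0 ∧ q.2 = 7) := by
            rintro ⟨h1, h2⟩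
            apply h7
            rw [PySem.Set.contains_iff]
            rwa [show q = ((0:Int), (7:Int)) from Prod.ext_iff.mpr ⟨h1, h2⟩] at hq
          have he2 : EscE (sh cur) q.1 q.2 := he
          rcases (EscE_unfold (sh cur) q.1 q.2).mp he2 with hg | ⟨j, hj, hok', he'⟩
          · exact absurd hg hng
          · exact ⟨q, hq, j, hj, hok', he'⟩

theorem dfs_alt_iff (b : List (List String)) (x y : Int) (hw : WfB b) :
    (dfs_alt b x y = true ↔ EscE b x y) := by
  by_cases hg : x = 0 ∧ y = 7
  · have hB : dfs_alt b x y = true := by simp [dfs_alt, hg]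
    rw [hB]
    exact ⟨fun _ => ⟨0, hg⟩, fun _ => rfl⟩
  · simp only [dfs_alt, if_neg hg]
    have hsingle : PySem.Set.ofList [(x, y)] = [(x, y)] := rfl
    rw [hsingle]
    have hc8 : ClearP (shIter (7+1) b) := clear_shIter8 b
    rw [loopB_spec 7 b [(x, y)] hw hc8]
    rw [EscE_unfold b x y]
    constructor
    · rintro ⟨p, hp, i, hi, hok, he⟩
      rcases List.mem_singleton.mp hp with rfl
      exact Or.inr ⟨i, hi, hok, he⟩
    · rintro (h | ⟨i, hi, hok, he⟩)
      · exact absurd h hg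
      · exact ⟨(x, y), by simp, i, hi, hok, he⟩

theorem far_okB (b : List (List String)) (x y : Int)
    (hf : x < -1 ∨ 8 < x ∨ y < -1 ∨ 8 < y) (i : Nat) (hi : i < 9) :
    okB b (x + dxL.getD i 0) (y + dyL.getD i 0) = false := by
  have hd := dGetD_mem i hi
  have hb : ¬ (0 ≤ x + dxL.getD i 0 ∧ x + dxL.getD i 0 < 8 ∧
      0 ≤ y + dyL.getD i 0 ∧ y + dyL.getD i 0 < 8) := by omega
  simp only [okB, decide_eq_false hb, Bool.false_and]

theorem far_dfs (n : Nat) (b : List (List String)) (x y : Int)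
    (hf : x < -1 ∨ 8 < x ∨ y < -1 ∨ 8 < y) : dfsF n b x y = false := by
  cases n with
  | zero => rfl
  | succ n =>
    have hg : ¬ (x = 0 ∧ y = 7) := by omega
    simp only [dfsF, if_neg hg]
    rw [List.any_eq_false]
    intro i hi
    show ¬ (okB b (x + dxL.getD i 0) (y + dyL.getD i 0) &&
        dfsF n (sh b) (x + dxL.getD i 0) (y + dyL.getD i 0)) = true
    rw [far_okB b x y hf i (List.mem_range.mp hi), Bool.false_and]
    simp

theorem loopB_empty (k : Nat) : ∀ (cur : List (List String)),
    loopB k cur PySem.Set.empty = false := by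
  induction k with
  | zero => intro cur; rfl
  | succ k ih =>
    intro cur
    have hexp : expandB cur PySem.Set.empty = PySem.Set.empty := rfl
    rw [loopB_succ, hexp]
    rw [if_neg (by simp [PySem.Set.contains, PySem.Set.empty])]
    by_cases hcl : isClearB (sh cur) = true
    · rw [if_pos hcl]; rfl
    · rw [if_neg hcl]; exact ih _

theorem expand_far_empty (b : List (List String)) (x y : Int)
    (hf : x < -1 ∨ 8 < x ∨ y < -1 ∨ 8 < y) :
    expandB b [(x, y)] = PySem.Set.empty := by
  have he : expandB b [(x, y)] = (List.range 9).foldl (fun nxt i =>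
      if okB b (x + dxL.getD i 0) (y + dyL.getD i 0) then
        PySem.Set.add nxt (x + dxL.getD i 0, y + dyL.getD i 0) else nxt)
      PySem.Set.empty := rfl
  rw [he]
  have h0 := far_okB b x y hf 0 (by omega)
  have h1 := far_okB b x y hf 1 (by omega)
  have h2 := far_okB b x y hf 2 (by omega)
  have h3 := far_okB b x y hf 3 (by omega)
  have h4 := far_okB b x y hf 4 (by omega)
  have h5 := far_okB b x y hf 5 (by omega)
  have h6 := far_okB b x y hf 6 (by omega)
  have h7 := far_okB b x y hf 7 (by omega)
  have h8 := far_okB b x y hf 8 (by omega)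
  rw [show List.range 9 = [0, 1, 2, 3, 4, 5, 6, 7, 8] from rfl]
  simp only [List.foldl_cons, List.foldl_nil, h0, h1, h2, h3, h4, h5, h6, h7, h8,
    Bool.false_eq_true, if_false]

theorem far_dfs_alt (b : List (List String)) (x y : Int)
    (hf : x < -1 ∨ 8 < x ∨ y < -1 ∨ 8 < y) : dfs_alt b x y = false := by
  have hg : ¬ (x = 0 ∧ y = 7) := by omega
  simp only [dfs_alt, if_neg hg]
  have hsingle : PySem.Set.ofList [(x, y)] = [(x, y)] := rfl
  rw [hsingle]
  show loopB (7+1) b [(x, y)] = false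
  rw [loopB_succ, expand_far_empty b x y hf]
  rw [if_neg (by simp [PySem.Set.contains, PySem.Set.empty])]
  by_cases hcl : isClearB (sh b) = true
  · rw [if_pos hcl]; rfl
  · rw [if_neg hcl]; exact loopB_empty 7 _

-- ===== VERDICT (by name: the statement is the Claim_ definition above) =====
theorem dfs_spec : Claim_equal_dfs := by
  intro board x y _ hPre
  show dfs board x y = dfs_alt board x y
  rcases hPre with hwf | hg | hf | hf | hf | hf
  · exact Bool.coe_iff_coe.mp ((dfs_iff board x y hwf).trans (dfs_alt_iff board x y hwf).symm)
  · obtain ⟨hx, hy⟩ := hg; subst hx; subst hy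
    have hA : dfs board 0 7 = true := by
      show dfsF (31+1) board 0 7 = true
      simp [dfsF]
    have hB : dfs_alt board 0 7 = true := by simp [dfs_alt]
    rw [hA, hB]
  all_goals
    show dfsF 32 board x y = dfs_alt board x y
    rw [far_dfs 32 board x y (by tauto), far_dfs_alt board x y (by tauto)]
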